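-- pv_equiv track=rewrite | github.com/venom1270/gibberish-generator | main.py | count
-- ===== SOURCE A (Python) =====
-- def count(sentences, word1, word2):
--     countw1 = 0
--     countw1w2 = 0
--     for sentence in sentences:
--         old = "<s>"
--         words = sentence.split(" ")
--         for word in words:
--             if old == word1:
--                 countw1 += 1
--                 if word == word2:
--                     countw1w2 += 1
--             old = word
--         if old == word1:
--             countw1 += 1
--             if "</s>" == word2:
--                 countw1w2 += 1
--     return countw1, countw1w2
-- ===== SOURCE B (Python) =====
-- def count(sentences, word1, word2):
--     unigrams = {}
--     bigrams = {}
--     for sentence in sentences: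
--         tokens = ["<s>"] + sentence.split(" ") + ["</s>"]
--         for pair in zip(tokens, tokens[1:]):
--             unigrams[pair[0]] = unigrams.get(pair[0], 0) + 1
--             bigrams[pair] = bigrams.get(pair, 0) + 1
--     return unigrams.get(word1, 0), bigrams.get((word1, word2), 0)
-- ===== Notes on version B (the rewrite author's own statement) =====
-- stated objective: alternative
-- what changed: B builds query-independent unigram and bigram frequency tables (hash maps) over sentinel-bracketed token pairs and answers by two dictionary lookups, instead of A's streaming scan that conditionally increments two counters while carrying the previous word.
import Mathlib
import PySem

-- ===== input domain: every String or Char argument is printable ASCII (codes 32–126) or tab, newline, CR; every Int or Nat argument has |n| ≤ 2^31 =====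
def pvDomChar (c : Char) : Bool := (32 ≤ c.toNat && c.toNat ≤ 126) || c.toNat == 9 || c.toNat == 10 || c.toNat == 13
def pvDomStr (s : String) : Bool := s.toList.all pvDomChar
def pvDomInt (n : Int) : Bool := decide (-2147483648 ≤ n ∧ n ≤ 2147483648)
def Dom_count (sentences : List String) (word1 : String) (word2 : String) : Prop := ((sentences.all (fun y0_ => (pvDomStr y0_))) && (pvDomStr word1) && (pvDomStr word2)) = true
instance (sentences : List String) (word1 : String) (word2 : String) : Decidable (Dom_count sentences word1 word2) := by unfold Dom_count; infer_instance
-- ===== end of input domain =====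

-- B builds query-independent unigram/bigram frequency dictionaries over sentinel-bracketed
-- token pairs and answers by two lookups (alternative algorithm, same asymptotic cost).

-- ===== PORT A =====
-- Literal transliteration of A: carried `old` variable, separate post-loop </s> branch.
def countInner (word1 word2 : String) (st : String × Int × Int) (word : String) : String × Int × Int :=
  if st.1 = word1 then
    (word, st.2.1 + 1, if word = word2 then st.2.2 + 1 else st.2.2)
  else (word, st.2.1, st.2.2)

def countSentence (word1 word2 : String) (acc : Int × Int) (sentence : String) : Int × Int :=
  let words := ((PySem.Str.split? sentence " ").getD [])
  let st := words.foldl (countInner word1 word2) ("<s>", acc.1, acc.2)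
  if st.1 = word1 then (st.2.1 + 1, if "</s>" = word2 then st.2.2 + 1 else st.2.2)
  else (st.2.1, st.2.2)

def count (sentences : List String) (word1 : String) (word2 : String) : Int × Int :=
  sentences.foldl (countSentence word1 word2) (0, 0)

-- ===== PORT B =====
-- B: tally every adjacent token pair into two frequency dictionaries, then look up.
def tallyPair (st : PySem.Dict String Int × PySem.Dict (String × String) Int)
    (p : String × String) : PySem.Dict String Int × PySem.Dict (String × String) Int :=
  (st.1.insert p.1 (st.1.getD p.1 0 + 1), st.2.insert p (st.2.getD p 0 + 1))

def count_alt (sentences : List String) (word1 : String) (word2 : String) : Int × Int :=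
  let tables := sentences.foldl (fun st sentence =>
    let tokens := ["<s>"] ++ ((PySem.Str.split? sentence " ").getD []) ++ ["</s>"]
    (List.zip tokens (tokens.drop 1)).foldl tallyPair st) (PySem.Dict.empty, PySem.Dict.empty)
  (tables.1.getD word1 0, tables.2.getD (word1, word2) 0)

-- ===== PRECONDITION & SPEC =====
def Spec_count (sentences : List String) (word1 : String) (word2 : String) (out : Int × Int) : Prop := out = count_alt sentences word1 word2
instance (sentences : List String) (word1 : String) (word2 : String) (out : Int × Int) : Decidable (Spec_count sentences word1 word2 out) := by unfold Spec_count; infer_instance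

-- ===== CLAIM (what is proved, stated in full; the proofs are below) =====
def Claim_equal_count : Prop := ∀ (sentences : List String) (word1 : String) (word2 : String), Dom_count sentences word1 word2 → Spec_count sentences word1 word2 (count sentences word1 word2)

-- ===== LEMMAS AND PROOFS =====

-- the adjacent-pair list of a sentence's sentinel-bracketed tokens
def pairsOf (s : String) : List (String × String) :=
  let tokens := ["<s>"] ++ ((PySem.Str.split? s " ").getD []) ++ ["</s>"]
  List.zip tokens (tokens.drop 1)

-- the pair step with independent components (p = (w1,w2) ↔ p.1 = w1 ∧ p.2 = w2)
def pairStep (w1 w2 : String) (acc : Int × Int) (p : String × String) : Int × Int :=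
  (if p.1 = w1 then acc.1 + 1 else acc.1, if p = (w1, w2) then acc.2 + 1 else acc.2)

-- A's inner loop plus its post-loop branch is the pairStep fold over the pair list
lemma inner_eq (w1 w2 : String) : ∀ (words : List String) (old : String) (c1 c12 : Int),
    (let st := words.foldl (countInner w1 w2) (old, c1, c12);
     if st.1 = w1 then (st.2.1 + 1, if "</s>" = w2 then st.2.2 + 1 else st.2.2)
     else (st.2.1, st.2.2))
    = (List.zip (old :: (words ++ ["</s>"])) (words ++ ["</s>"])).foldl (pairStep w1 w2) (c1, c12) := by
  intro words
  induction words with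
  | nil =>
    intro old c1 c12
    by_cases h : old = w1 <;> simp [pairStep, h, Prod.ext_iff]
  | cons w ws ih =>
    intro old c1 c12
    simp only [List.cons_append, List.zip_cons_cons, List.foldl_cons]
    rw [← ih w]
    by_cases h : old = w1
    · by_cases h2 : w = w2 <;> simp [countInner, pairStep, h, h2, Prod.ext_iff]
    · simp [countInner, pairStep, h, Prod.ext_iff]

lemma sentence_eq (w1 w2 : String) (acc : Int × Int) (s : String) :
    countSentence w1 w2 acc s = (pairsOf s).foldl (pairStep w1 w2) acc := by
  simp only [countSentence, pairsOf, List.cons_append, List.nil_append, List.drop_succ_cons,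
    List.drop_zero]
  exact inner_eq w1 w2 (((PySem.Str.split? s " ").getD [])) "<s>" acc.1 acc.2

-- folding a per-sentence inner fold over all sentences is folding over the flatMap
lemma fold_flatMap {α β : Type} (f : β → String × String → β) :
    ∀ (ss : List α) (g : α → List (String × String)) (init : β),
    ss.foldl (fun acc s => (g s).foldl f acc) init = (ss.flatMap g).foldl f init := by
  intro ss
  induction ss with
  | nil => intro g init; rfl
  | cons s t ih => intro g init; simp only [List.foldl_cons, List.flatMap_cons, List.foldl_append, ih]

-- A's total: fold of pairStep over all pairs, evaluated in closed form
lemma a_closed (sentences : List String) (w1 w2 : String) :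
    count sentences w1 w2
      = ((((sentences.flatMap pairsOf).map Prod.fst).count w1 : Int),
         (((sentences.flatMap pairsOf).count (w1, w2) : Int))) := by
  unfold count
  have h1 : countSentence w1 w2 = fun acc s => (pairsOf s).foldl (pairStep w1 w2) acc :=
    funext fun acc => funext fun s => sentence_eq w1 w2 acc s
  rw [h1, fold_flatMap (pairStep w1 w2) sentences pairsOf (0, 0)]
  unfold pairStep
  rw [PySem.List.foldl_prod_mk
    (f := fun (c : Int) (p : String × String) => if p.1 = w1 then c + 1 else c)
    (g := fun (c : Int) (p : String × String) => if p = (w1, w2) then c + 1 else c)]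
  rw [PySem.List.foldl_ite_add_one, PySem.List.foldl_ite_add_one]
  congr 1
  · rw [List.count_eq_countP, List.countP_map, Int.zero_add]
    norm_cast
  · rw [List.count_eq_countP, Int.zero_add]
    norm_cast
    apply List.countP_congr; intro p _; simp

-- B's total: the two dictionaries are counters over all pairs
lemma b_closed (sentences : List String) (w1 w2 : String) :
    count_alt sentences w1 w2
      = ((((sentences.flatMap pairsOf).map Prod.fst).count w1 : Int),
         (((sentences.flatMap pairsOf).count (w1, w2) : Int))) := by
  unfold count_alt
  have h1 : (fun (st : PySem.Dict String Int × PySem.Dict (String × String) Int) sentence =>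
      let tokens := ["<s>"] ++ ((PySem.Str.split? sentence " ").getD []) ++ ["</s>"]
      (List.zip tokens (tokens.drop 1)).foldl tallyPair st)
      = fun st s => (pairsOf s).foldl tallyPair st := by
    funext st s
    simp only [pairsOf, List.cons_append, List.nil_append, List.drop_succ_cons, List.drop_zero]
  rw [h1, fold_flatMap tallyPair sentences pairsOf (PySem.Dict.empty, PySem.Dict.empty)]
  show ((List.foldl tallyPair (PySem.Dict.empty, PySem.Dict.empty) (List.flatMap pairsOf sentences)).1.getD w1 0,
    (List.foldl tallyPair (PySem.Dict.empty, PySem.Dict.empty) (List.flatMap pairsOf sentences)).2.getD (w1, w2) 0) = _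
  unfold tallyPair
  rw [PySem.List.foldl_prod_mk
    (f := fun (d : PySem.Dict String Int) (p : String × String) => d.insert p.1 (d.getD p.1 0 + 1))
    (g := fun (d : PySem.Dict (String × String) Int) (p : String × String) => d.insert p (d.getD p 0 + 1))]
  congr 1
  · rw [show (List.flatMap pairsOf sentences).foldl
        (fun (d : PySem.Dict String Int) (p : String × String) => d.insert p.1 (d.getD p.1 0 + 1))
        PySem.Dict.empty
        = ((List.flatMap pairsOf sentences).map Prod.fst).foldl
            (fun (d : PySem.Dict String Int) x => d.insert x (d.getD x 0 + 1)) PySem.Dict.empty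
      from (List.foldl_map (f := Prod.fst)
        (g := fun (d : PySem.Dict String Int) x => d.insert x (d.getD x 0 + 1))
        (l := List.flatMap pairsOf sentences) (init := PySem.Dict.empty)).symm]
    rw [PySem.Dict.getD_foldl_insert_add_one]
    simp [PySem.Dict.getD_empty]
  · rw [PySem.Dict.getD_foldl_insert_add_one]
    simp [PySem.Dict.getD_empty]

-- ===== VERDICT (by name: the statement is the Claim_ definition above) =====
theorem count_spec : Claim_equal_count := by
  intro sentences word1 word2 _
  unfold Spec_count
  rw [a_closed, b_closed]
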